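-- pv_equiv track=rewrite | github.com/ODCS1/PersonalTechStudies | python/exercicios/lista8/ex14.py | posicao_esquerda_sequencia_while
-- ===== SOURCE A (Python) =====
-- def posicao_esquerda_sequencia_while(sequencia: tuple[int], vetor: tuple[int]) -> int:
--     if not isinstance(sequencia, tuple) or not isinstance(vetor, tuple):
--         raise ValueError
--
--     len_seq = len(sequencia)
--     i = 0
--     while i < len(vetor) - len_seq + 1:
--         if vetor[i:i+len_seq] == sequencia:
--             return i
--         i += 1
--     return -1
-- ===== SOURCE B (Python) =====
-- def posicao_esquerda_sequencia_while(sequencia: tuple[int], vetor: tuple[int]) -> int: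
--     # Rabin-Karp: rolling polynomial hash over a sliding window; compare slices
--     # only when the hashes agree.
--     m = len(sequencia)
--     n = len(vetor)
--     p = 1000000007
--     base = 131
--     hs = 0
--     for x in sequencia:
--         hs = (hs * base + x) % p
--     h = 0
--     for x in vetor[:m]:
--         h = (h * base + x) % p
--     pw = 1
--     for _ in range(m - 1):
--         pw = pw * base % p
--     for i in range(n - m + 1):
--         if h == hs and vetor[i:i+m] == sequencia:
--             return i
--         if i < n - m:
--             h = ((h - vetor[i] * pw) * base + vetor[i + m]) % p
--     return -1
-- ===== Notes on version B (the rewrite author's own statement) =====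
-- stated objective: alternative
-- what changed: Replaces A's compare-a-slice-at-every-offset scan by Rabin-Karp: a rolling polynomial hash (mod 1000000007, base 131) of the current window is maintained in O(1) per shift and the slice is compared against the pattern only when the window hash equals the pattern hash.
import Mathlib
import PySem

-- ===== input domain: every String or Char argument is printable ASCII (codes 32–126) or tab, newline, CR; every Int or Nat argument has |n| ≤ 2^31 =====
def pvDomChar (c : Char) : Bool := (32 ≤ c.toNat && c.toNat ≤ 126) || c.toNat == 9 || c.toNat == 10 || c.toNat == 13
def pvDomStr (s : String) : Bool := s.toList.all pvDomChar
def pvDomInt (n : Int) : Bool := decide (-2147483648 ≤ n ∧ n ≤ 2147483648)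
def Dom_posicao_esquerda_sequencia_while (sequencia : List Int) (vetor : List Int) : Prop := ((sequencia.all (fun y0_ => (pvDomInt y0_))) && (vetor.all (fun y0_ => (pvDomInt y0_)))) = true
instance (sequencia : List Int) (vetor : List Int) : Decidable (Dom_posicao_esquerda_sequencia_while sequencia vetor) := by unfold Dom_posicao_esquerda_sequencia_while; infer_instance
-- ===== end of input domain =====

-- B replaces A's slice-compare-at-every-offset loop by Rabin-Karp rolling-hash search
-- (slices are compared only on hash hits); alternative algorithm, same worst-case cost.

-- ===== PORT A =====
-- the while-loop of A, i stepping upward until len(vetor) - len_seq + 1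
def pvLoopA (sequencia : List Int) (vetor : List Int) (lenSeq : Int) (i : Int) : Int :=
  if i < (vetor.length : Int) - lenSeq + 1 then
    if PySem.List.slice vetor (some i) (some (i + lenSeq)) == sequencia then i
    else pvLoopA sequencia vetor lenSeq (i + 1)
  else -1
termination_by ((vetor.length : Int) - lenSeq + 1 - i).toNat
decreasing_by omega

def posicao_esquerda_sequencia_while (sequencia : List Int) (vetor : List Int) : Int :=
  pvLoopA sequencia vetor (sequencia.length : Int) 0

-- ===== PORT B =====
-- one step 'h = (h * base + x) % p' of Source B's hash loops (p = 1000000007, base = 131)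
def pvHashStep (a x : Int) : Int := PySem.Int.mod (a * 131 + x) 1000000007

-- the main 'for i in range(n - m + 1)' loop of Source B; the pyGet? reads are guarded by
-- 'i < n - m', so both indices are always in range and the .getD 0 default is never used
def pvLoopB (sequencia : List Int) (vetor : List Int) (m pw hs : Int) (i h : Int) : Int :=
  if i < (vetor.length : Int) - m + 1 then
    if h == hs && (PySem.List.slice vetor (some i) (some (i + m)) == sequencia) then i
    else pvLoopB sequencia vetor m pw hs (i + 1)
      (if i < (vetor.length : Int) - m then
        PySem.Int.mod ((h - ((PySem.List.pyGet? vetor i).getD 0) * pw) * 131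
            + ((PySem.List.pyGet? vetor (i + m)).getD 0)) 1000000007
       else h)
  else -1
termination_by ((vetor.length : Int) - m + 1 - i).toNat
decreasing_by omega

def posicao_esquerda_sequencia_while_alt (sequencia : List Int) (vetor : List Int) : Int :=
  let m : Int := sequencia.length
  let hs := sequencia.foldl pvHashStep 0
  let h := (PySem.List.slice vetor none (some m)).foldl pvHashStep 0
  let pw := (List.range (m - 1).toNat).foldl (fun a _ => PySem.Int.mod (a * 131) 1000000007) 1
  pvLoopB sequencia vetor m pw hs 0 h

-- ===== PRECONDITION & SPEC =====
def Spec_posicao_esquerda_sequencia_while (sequencia : List Int) (vetor : List Int) (out : Int) : Prop := out = posicao_esquerda_sequencia_while_alt sequencia vetor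
instance (sequencia : List Int) (vetor : List Int) (out : Int) : Decidable (Spec_posicao_esquerda_sequencia_while sequencia vetor out) := by unfold Spec_posicao_esquerda_sequencia_while; infer_instance

-- ===== CLAIM (what is proved, stated in full; the proofs are below) =====
def Claim_equal_posicao_esquerda_sequencia_while : Prop := ∀ (sequencia : List Int) (vetor : List Int), Dom_posicao_esquerda_sequencia_while sequencia vetor → Spec_posicao_esquerda_sequencia_while sequencia vetor (posicao_esquerda_sequencia_while sequencia vetor)

-- ===== LEMMAS AND PROOFS =====

-- the unreduced polynomial step (no modulus)
def pvQStep (a z : Int) : Int := a * 131 + z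

theorem pv_mod_eq (x : Int) : PySem.Int.mod x 1000000007 = x % 1000000007 :=
  PySem.Int.mod_eq_emod_of_pos (by norm_num)

theorem pv_emod_mul_add (a z : Int) :
    ((a % 1000000007) * 131 + z) % 1000000007 = (a * 131 + z) % 1000000007 := by
  conv_lhs => rw [Int.add_emod, Int.mul_emod, Int.emod_emod_of_dvd _ dvd_rfl]
  rw [← Int.mul_emod, ← Int.add_emod]

theorem pv_hash_eq_q (w : List Int) : ∀ a : Int,
    w.foldl pvHashStep (a % 1000000007) = (w.foldl pvQStep a) % 1000000007 := by
  induction w with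
  | nil => intro a; rfl
  | cons z t ih =>
      intro a
      simp only [List.foldl]
      rw [pvHashStep, pv_mod_eq, pv_emod_mul_add, ← pvQStep]
      exact ih (pvQStep a z)

theorem pv_hash0 (w : List Int) :
    w.foldl pvHashStep 0 = (w.foldl pvQStep 0) % 1000000007 := by
  have h := pv_hash_eq_q w 0
  simpa using h

theorem pv_q_acc (w : List Int) : ∀ a : Int,
    w.foldl pvQStep a = a * 131 ^ w.length + w.foldl pvQStep 0 := by
  induction w with
  | nil => intro a; simp
  | cons z t ih =>
      intro a
      simp only [List.foldl, List.length_cons]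
      rw [ih (pvQStep a z), ih (pvQStep 0 z)]
      simp only [pvQStep]
      ring

theorem pv_pw_eq (k : Nat) :
    (List.range k).foldl (fun a _ => PySem.Int.mod (a * 131) 1000000007) 1
      = (131 : Int) ^ k % 1000000007 := by
  induction k with
  | zero => decide
  | succ n ih =>
      rw [List.range_succ, List.foldl_append, ih]
      simp only [List.foldl]
      rw [pv_mod_eq, Int.mul_emod, Int.emod_emod_of_dvd _ dvd_rfl, ← Int.mul_emod, pow_succ]

-- the rolling-hash step: removing the leftmost element and appending a new one
theorem pv_roll (x y : Int) (ws : List Int) :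
    (ws ++ [y]).foldl pvHashStep 0 =
      ((((x :: ws).foldl pvHashStep 0) - x * ((131 : Int) ^ ws.length % 1000000007)) * 131 + y)
        % 1000000007 := by
  rw [pv_hash0, pv_hash0]
  rw [List.foldl_append]
  simp only [List.foldl]
  have hq : ws.foldl pvQStep (pvQStep 0 x) = x * 131 ^ ws.length + ws.foldl pvQStep 0 := by
    have h0 : pvQStep 0 x = x := by simp [pvQStep]
    rw [h0, pv_q_acc ws x]
  rw [hq]
  have h1 : ((x * 131 ^ ws.length + ws.foldl pvQStep 0) % 1000000007)
      ≡ (x * 131 ^ ws.length + ws.foldl pvQStep 0) [ZMOD 1000000007] :=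
    Int.emod_emod_of_dvd _ dvd_rfl
  have h2 : (x * ((131 : Int) ^ ws.length % 1000000007))
      ≡ x * (131 : Int) ^ ws.length [ZMOD 1000000007] :=
    Int.ModEq.mul_left x (Int.emod_emod_of_dvd _ dvd_rfl)
  have h3 := ((h1.sub h2).mul_right 131).add_right y
  rw [h3]
  have h4 : (x * 131 ^ ws.length + ws.foldl pvQStep 0 - x * 131 ^ ws.length)
      = ws.foldl pvQStep 0 := by ring
  rw [h4]
  simp [pvQStep]

-- window decompositions
theorem pv_window_cons (v : List Int) (j k : Nat) (h : j + k + 1 ≤ v.length) :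
    (v.drop j).take (k + 1) = (v[j]?.getD 0) :: ((v.drop (j + 1)).take k) := by
  have hj : j < v.length := by omega
  rw [List.drop_eq_getElem_cons hj, List.take_succ_cons, List.getElem?_eq_getElem hj]
  rfl

theorem pv_window_snoc (v : List Int) (j k : Nat) (h : j + k + 1 < v.length) :
    (v.drop (j + 1)).take (k + 1) = ((v.drop (j + 1)).take k) ++ [v[j + 1 + k]?.getD 0] := by
  rw [List.take_add_one, List.getElem?_drop]
  have : (j + 1 + k) < v.length := by omega
  rw [List.getElem?_eq_getElem this]
  rfl

-- main invariant: B's loop with a correct window hash computes A's loop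
theorem pv_loops_eq (sequencia vetor : List Int) (pw : Int)
    (hpw : 1 ≤ sequencia.length →
      pw = (131 : Int) ^ (sequencia.length - 1) % 1000000007) :
    ∀ (i h : Int), 0 ≤ i →
      (i < (vetor.length : Int) - sequencia.length + 1 →
        h = (PySem.List.slice vetor (some i) (some (i + sequencia.length))).foldl pvHashStep 0) →
      pvLoopB sequencia vetor (sequencia.length : Int) pw (sequencia.foldl pvHashStep 0) i h
        = pvLoopA sequencia vetor (sequencia.length : Int) i := by
  intro i h hi hinv
  rw [pvLoopA, pvLoopB]
  by_cases hlt : i < (vetor.length : Int) - (sequencia.length : Int) + 1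
  · rw [if_pos hlt, if_pos hlt]
    have hh := hinv hlt
    cases hseq : (PySem.List.slice vetor (some i) (some (i + (sequencia.length : Int))) == sequencia)
    · -- no match at i: both recurse
      simp only [Bool.and_false, Bool.false_eq_true, if_false]
      -- sequencia cannot be empty here (the empty slice would have matched)
      have hm : 1 ≤ sequencia.length := by
        by_contra hc
        have hs0 : sequencia = [] := by
          cases sequencia with
          | nil => rfl
          | cons a t => simp at hc
        subst hs0
        simp at hseq
        apply hseq
        have h0 : (0 : Int) ≤ i := hi
        rw [PySem.List.slice_toNat vetor h0 h0]
        simp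
      obtain ⟨k, hk⟩ : ∃ k, sequencia.length = k + 1 := ⟨sequencia.length - 1, by omega⟩
      apply pv_loops_eq sequencia vetor pw hpw (i + 1) _ (by omega)
      intro hlt2
      -- the guard fires because a further iteration exists
      have hguard : i < (vetor.length : Int) - (sequencia.length : Int) := by omega
      rw [if_pos hguard]
      -- move to Nat indices
      obtain ⟨j, hj⟩ : ∃ j : Nat, i = (j : Int) := ⟨i.toNat, by omega⟩
      subst hj
      have hlen : j + k + 1 < vetor.length := by
        have : (j : Int) + (sequencia.length : Int) < (vetor.length : Int) := by omega
        omega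
      have e1 : (j : Int) + (sequencia.length : Int) = (j : Int) + ((k + 1 : Nat) : Int) := by
        push_cast; omega
      have e2 : (j : Int) + 1 = ((j + 1 : Nat) : Int) := by push_cast; ring
      have e3 : ((j + 1 : Nat) : Int) + (sequencia.length : Int)
          = ((j + 1 : Nat) : Int) + ((k + 1 : Nat) : Int) := by push_cast; omega
      rw [e2, e3, PySem.List.slice_natCast_add]
      rw [e1, PySem.List.slice_natCast_add] at hh
      have hget1 : PySem.List.pyGet? vetor ((j : Int)) = vetor[j]? :=
        PySem.List.pyGet?_natCast vetor j
      have hget2 : PySem.List.pyGet? vetor ((j : Int) + (sequencia.length : Int))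
          = vetor[j + 1 + k]? := by
        have : (j : Int) + (sequencia.length : Int) = ((j + 1 + k : Nat) : Int) := by
          push_cast; omega
        rw [this, PySem.List.pyGet?_natCast]
      rw [hget1, hget2, pv_mod_eq]
      -- rolling-hash correctness on the windows
      have hwin1 : (vetor.drop j).take (k + 1)
          = (vetor[j]?.getD 0) :: ((vetor.drop (j + 1)).take k) :=
        pv_window_cons vetor j k (by omega)
      have hwin2 : (vetor.drop (j + 1)).take (k + 1)
          = ((vetor.drop (j + 1)).take k) ++ [vetor[j + 1 + k]?.getD 0] :=
        pv_window_snoc vetor j k hlen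
      have hlentail : ((vetor.drop (j + 1)).take k).length = k := by
        rw [List.length_take, List.length_drop]
        omega
      rw [hwin1] at hh
      rw [hwin2]
      rw [pv_roll (vetor[j]?.getD 0) (vetor[j + 1 + k]?.getD 0) ((vetor.drop (j + 1)).take k)]
      rw [hlentail, ← hh]
      rw [hpw hm, hk]
      simp
    · -- match at i: the hashes agree, both return i
      have heq : PySem.List.slice vetor (some i) (some (i + (sequencia.length : Int))) = sequencia :=
        by exact beq_iff_eq.mp hseq
      have hhs : (h == sequencia.foldl pvHashStep 0) = true := by
        rw [hh, heq]
        exact beq_self_eq_true _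
      simp only [Bool.and_true, hhs]
      simp
  · rw [if_neg hlt, if_neg hlt]
termination_by i _ => ((vetor.length : Int) - sequencia.length + 1 - i).toNat
decreasing_by omega

-- ===== VERDICT (by name: the statement is the Claim_ definition above) =====
theorem posicao_esquerda_sequencia_while_spec : Claim_equal_posicao_esquerda_sequencia_while := by
  intro sequencia vetor _
  unfold Spec_posicao_esquerda_sequencia_while
  unfold posicao_esquerda_sequencia_while posicao_esquerda_sequencia_while_alt
  simp only []
  rw [pv_pw_eq]
  rw [pv_loops_eq sequencia vetor _ ?hpw 0 _ (by omega) ?hinv]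
  case hpw =>
    intro hm
    have e : ((sequencia.length : Int) - 1).toNat = sequencia.length - 1 := by omega
    rw [e]
  case hinv =>
    intro _
    rw [zero_add]
    have h0 : PySem.List.slice vetor (some (0 : Int)) (some ((sequencia.length : Int)))
        = PySem.List.slice vetor none (some ((sequencia.length : Int))) :=
      PySem.List.slice_zero_start vetor _
    rw [h0]
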